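-- pv_equiv track=rewrite | github.com/Tayyriaz/Warmprospect | core/cta_handlers.py | should_attach_ctas
-- ===== SOURCE A (Python) =====
-- def should_attach_ctas(text: str) -> bool:
--     """
--     Determine if CTAs should be attached to the response.
--     CTAs are shown when:
--     1. Response contains "please choose one of the options below"
--     2. Response asks a question or suggests an action
--     3. Response is a greeting or initial message
--     """
--     if not text:
--         return False
--     normalized = text.lower()
--
--     # Always show CTAs if response contains these phrases
--     cta_indicators = [
--         "please choose one of the options below",
--         "how can i help",
--         "what would you like",
--         "would you like to",
--         "can i help you",
--         "let me know",
--         "feel free to"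
--     ]
--
--     # Check if any indicator is present
--     for indicator in cta_indicators:
--         if indicator in normalized:
--             return True
--
--     # Also show CTAs if response ends with a question mark
--     if text.strip().endswith("?"):
--         return True
--
--     return False
-- ===== SOURCE B (Python) =====
-- CTA_PHRASES = [
--     "please choose one of the options below",
--     "how can i help",
--     "what would you like",
--     "would you like to",
--     "can i help you",
--     "let me know",
--     "feel free to",
-- ]
--
--
-- def should_attach_ctas(text: str) -> bool:
--     # NFA-style multi-pattern scan: one left-to-right pass over the lowercased
--     # text, maintaining the set of partially matched phrase suffixes (active
--     # states).  At each character every active suffix either advances or dies,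
--     # and every phrase is started fresh; a phrase occurs iff some suffix is
--     # fully consumed.  Fallback: trailing question mark, as before.
--     pending = []
--     for c in text.lower():
--         pending = [p[1:] for p in pending + CTA_PHRASES if p[:1] == c]
--         if "" in pending:
--             return True
--     return text.strip().endswith("?")
-- ===== Notes on version B (the rewrite author's own statement) =====
-- stated objective: alternative
-- what changed: Replaces seven independent whole-text substring scans with a single left-to-right NFA-simulation pass that maintains the set of partially matched phrase suffixes as active states, completing a match when a suffix is fully consumed; the trailing question-mark fallback is unchanged.
import Mathlib
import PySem

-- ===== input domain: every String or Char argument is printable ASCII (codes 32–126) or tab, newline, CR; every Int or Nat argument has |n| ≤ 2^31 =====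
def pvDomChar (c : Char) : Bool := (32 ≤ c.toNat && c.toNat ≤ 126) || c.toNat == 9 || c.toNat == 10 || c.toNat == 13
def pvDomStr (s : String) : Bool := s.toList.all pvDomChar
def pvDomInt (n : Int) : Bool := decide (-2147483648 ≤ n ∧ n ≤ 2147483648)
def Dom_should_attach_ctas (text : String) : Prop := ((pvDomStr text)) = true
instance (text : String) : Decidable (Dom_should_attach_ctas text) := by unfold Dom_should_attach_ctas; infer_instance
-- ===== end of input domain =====

-- B replaces A's seven independent whole-text substring scans by a single NFA-simulation
-- pass: one traversal of the lowercased text maintaining the set of partially matched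
-- phrase suffixes (alternative; same asymptotic cost).

-- ===== PORT A =====
def ctaIndicators : List String :=
  ["please choose one of the options below",
   "how can i help",
   "what would you like",
   "would you like to",
   "can i help you",
   "let me know",
   "feel free to"]

def should_attach_ctas (text : String) : Bool :=
  if text.toList = [] then false          -- `if not text: return False`
  else
    let normalized := PySem.Str.lower text
    -- `for indicator in cta_indicators: if indicator in normalized: return True`
    if ctaIndicators.any (fun ind => PySem.Str.isIn ind normalized) then true
    else if PySem.Str.endswith (PySem.Str.strip text) "?" then true
    else false

-- ===== PORT B =====
def ctaPhrases : List (List Char) :=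
  ["please choose one of the options below".toList,
   "how can i help".toList,
   "what would you like".toList,
   "would you like to".toList,
   "can i help you".toList,
   "let me know".toList,
   "feel free to".toList]

-- the `for c in text.lower()` loop: `pending` is the set of active partial-match
-- suffixes; `p[:1] == c` keeps exactly the suffixes starting with c, advanced by one
def ctaScan : List (List Char) → List Char → Bool
  | _, [] => false
  | pending, c :: rest =>
    let pending' := (pending ++ ctaPhrases).filterMap
      (fun p => match p with
        | x :: xs => if x = c then some xs else none
        | [] => none)
    if pending'.any (· = []) then true      -- `if "" in pending: return True`
    else ctaScan pending' rest

def should_attach_ctas_alt (text : String) : Bool :=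
  if ctaScan [] (PySem.Chars.lower text.toList) then true
  else PySem.Str.endswith (PySem.Str.strip text) "?"

-- ===== PRECONDITION & SPEC =====
def Spec_should_attach_ctas (text : String) (out : Bool) : Prop := out = should_attach_ctas_alt text
instance (text : String) (out : Bool) : Decidable (Spec_should_attach_ctas text out) := by unfold Spec_should_attach_ctas; infer_instance

-- ===== CLAIM (what is proved, stated in full; the proofs are below) =====
def Claim_equal_should_attach_ctas : Prop := ∀ (text : String), Dom_should_attach_ctas text → Spec_should_attach_ctas text (should_attach_ctas text)

-- ===== LEMMAS AND PROOFS =====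

lemma phrases_ne_nil : ∀ p ∈ ctaPhrases, p ≠ [] := by decide

lemma phrases_eq : ctaPhrases = ctaIndicators.map String.toList := by decide

-- Loop invariant of the NFA pass: with no already-completed state in `pending`,
-- the scan succeeds iff some active suffix is a prefix of the rest, or some
-- phrase occurs somewhere in the rest.
lemma ctaScan_iff (rest : List Char) : ∀ (pending : List (List Char)),
    (∀ p ∈ pending, p ≠ []) →
    (ctaScan pending rest = true ↔
      (∃ p ∈ pending, p <+: rest) ∨ (∃ i, ∃ q ∈ ctaPhrases, q <+: rest.drop i)) := by
  induction rest with
  | nil =>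
    intro pending hp
    simp only [ctaScan, List.drop_nil, List.prefix_nil]
    constructor
    · intro h; exact absurd h (by simp)
    · rintro (⟨p, hmem, hpl⟩ | ⟨i, q, hmem, hql⟩)
      · exact absurd hpl (hp p hmem)
      · exact absurd hql (phrases_ne_nil q hmem)
  | cons c rs ih =>
    intro pending hp
    simp only [ctaScan]
    set pending' := (pending ++ ctaPhrases).filterMap
      (fun p => match p with
        | x :: xs => if x = c then some xs else none
        | [] => none) with hpend
    have hmem' : ∀ p', p' ∈ pending' ↔ (c :: p') ∈ pending ++ ctaPhrases := by
      intro p'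
      rw [hpend, List.mem_filterMap]
      constructor
      · rintro ⟨p, hmem, hsome⟩
        match p with
        | [] => simp at hsome
        | x :: xs =>
          simp only at hsome
          split at hsome
          · next hx => cases hsome; subst hx; exact hmem
          · simp at hsome
      · intro h; exact ⟨c :: p', h, by simp⟩
    by_cases hdone : pending'.any (· = []) = true
    · simp only [hdone, if_true, true_iff]
      obtain ⟨p', hmemp, hnil⟩ := List.any_eq_true.mp hdone
      have := (hmem' p').mp hmemp
      simp only [decide_eq_true_eq] at hnil
      subst hnil
      rcases List.mem_append.mp this with h | h
      · exact Or.inl ⟨[c], h, by simp⟩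
      · exact Or.inr ⟨0, [c], h, by simp⟩
    · simp only [hdone, if_false, Bool.false_eq_true]
      have hp' : ∀ p ∈ pending', p ≠ [] := by
        intro p hmemp hnil
        exact hdone (List.any_eq_true.mpr ⟨p, hmemp, by simp [hnil]⟩)
      rw [ih pending' hp']
      constructor
      · rintro (⟨p', hmemp, hpl⟩ | ⟨i, q, hmem, hql⟩)
        · rcases List.mem_append.mp ((hmem' p').mp hmemp) with h | h
          · exact Or.inl ⟨c :: p', h, List.cons_prefix_cons.mpr ⟨rfl, hpl⟩⟩
          · exact Or.inr ⟨0, c :: p', h, by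
              simp only [List.drop_zero]
              exact List.cons_prefix_cons.mpr ⟨rfl, hpl⟩⟩
        · exact Or.inr ⟨i + 1, q, hmem, by simpa using hql⟩
      · rintro (⟨p, hmemp, hpl⟩ | ⟨i, q, hmem, hql⟩)
        · match p, hp p hmemp with
          | x :: xs, _ =>
            obtain ⟨hx, hxs⟩ := List.cons_prefix_cons.mp hpl
            subst hx
            exact Or.inl ⟨xs, (hmem' xs).mpr (List.mem_append_left _ hmemp), hxs⟩
        · match i with
          | 0 =>
            simp only [List.drop_zero] at hql
            match q, phrases_ne_nil q hmem with
            | x :: xs, _ =>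
              obtain ⟨hx, hxs⟩ := List.cons_prefix_cons.mp hql
              subst hx
              exact Or.inl ⟨xs, (hmem' xs).mpr (List.mem_append_right _ hmem), hxs⟩
          | j + 1 =>
            exact Or.inr ⟨j, q, hmem, by simpa using hql⟩

-- The NFA pass from the empty state finds exactly the substring occurrences A scans for.
lemma ctaScan_eq_any (s : List Char) :
    ctaScan [] s = ctaIndicators.any (fun ind => PySem.Chars.isIn ind.toList s) := by
  apply Bool.coe_iff_coe.mp
  rw [ctaScan_iff s [] (by simp)]
  simp only [List.not_mem_nil, false_and, exists_false, List.any_eq_true, false_or,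
    phrases_eq, List.mem_map]
  constructor
  · rintro ⟨i, q, ⟨ind, hind, rfl⟩, hql⟩
    exact ⟨ind, hind, (PySem.Chars.exists_prefix_drop_iff_isIn _ _).mp ⟨i, hql⟩⟩
  · rintro ⟨ind, hind, hin⟩
    obtain ⟨i, hi⟩ := (PySem.Chars.exists_prefix_drop_iff_isIn _ _).mpr hin
    exact ⟨i, ind.toList, ⟨ind, hind, rfl⟩, hi⟩

-- ===== VERDICT (by name: the statement is the Claim_ definition above) =====
theorem should_attach_ctas_spec : Claim_equal_should_attach_ctas := by
  intro text _
  show should_attach_ctas text = should_attach_ctas_alt text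
  unfold should_attach_ctas should_attach_ctas_alt
  simp only [PySem.Str.isIn_eq, PySem.Str.toList_lower]
  rw [ctaScan_eq_any (PySem.Chars.lower text.toList)]
  by_cases h : text.toList = []
  · simp only [h, if_true, PySem.Str.endswith_eq, PySem.Str.toList_strip]
    simp [PySem.Chars.lower]
    decide
  · simp only [h, if_false]
    split
    · rfl
    · split <;> simp_all
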